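-- pv_equiv track=rewrite | github.com/brunchmate/-AlgorithmStudy | maplejh/Programmers/쿠키 구입.py | solution
-- ===== SOURCE A (Python) =====
-- def solution(cookie):
--     answer = 0
--     n = len(cookie)
--     for m in range(n):
--         a = 0
--         b = 0
--         c = set()
--         for i in range(m, -1, -1):
--             a += cookie[i]
--             c.add(a)
--         for j in range(m + 1, n):
--             b += cookie[j]
--             if b in c:
--                 answer = max(answer, b)
--     return answer
-- ===== SOURCE B (Python) =====
-- def solution(cookie):
--     # One prefix-sum array built once; an incrementally grown set of prefix values
--     # replaces A's per-midpoint rebuild of all left running sums.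
--     n = len(cookie)
--     s = 0
--     pre = [0]
--     for x in cookie:
--         s += x
--         pre.append(s)
--     answer = 0
--     seen = set()
--     for m in range(n):
--         seen.add(pre[m])
--         t = 2 * pre[m + 1]
--         for j in range(m + 1, n):
--             if t - pre[j + 1] in seen:
--                 answer = max(answer, pre[j + 1] - pre[m + 1])
--     return answer
-- ===== Notes on version B (the rewrite author's own statement) =====
-- stated objective: alternative
-- what changed: B precomputes one prefix-sum array and grows a single set of prefix values across midpoints, testing 2*pre[m+1]-pre[j+1] membership, so A's inner backward loop that rebuilds the set of left running sums for every midpoint disappears.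
import Mathlib
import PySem

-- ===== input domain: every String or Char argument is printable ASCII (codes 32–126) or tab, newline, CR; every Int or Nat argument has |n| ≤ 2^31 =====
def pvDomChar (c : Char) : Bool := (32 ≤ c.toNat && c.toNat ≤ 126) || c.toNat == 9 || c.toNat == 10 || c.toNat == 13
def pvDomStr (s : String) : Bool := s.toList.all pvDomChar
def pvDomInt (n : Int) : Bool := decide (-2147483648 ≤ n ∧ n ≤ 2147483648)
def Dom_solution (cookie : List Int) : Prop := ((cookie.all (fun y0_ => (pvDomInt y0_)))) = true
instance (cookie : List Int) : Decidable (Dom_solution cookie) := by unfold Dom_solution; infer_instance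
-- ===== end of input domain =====

-- B replaces A's per-midpoint rebuild of the left-sum set by one prefix-sum array and one
-- incrementally grown set of prefix values (same O(n^2) cost, one inner loop fewer).

-- ===== PORT A =====
def solution (cookie : List Int) : Int :=
  let n : Int := cookie.length
  (PySem.List.pyRange 0 n 1).foldl (fun answer m =>
    let ac : Int × PySem.Set Int :=
      (PySem.List.pyRange m (-1) (-1)).foldl
        (fun p i =>
          let a := p.1 + PySem.List.pyGetD cookie i 0
          (a, PySem.Set.add p.2 a))
        (0, PySem.Set.empty)
    let res : Int × Int :=
      (PySem.List.pyRange (m + 1) n 1).foldl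
        (fun q j =>
          let b := q.1 + PySem.List.pyGetD cookie j 0
          (b, if PySem.Set.contains ac.2 b then max q.2 b else q.2))
        (0, answer)
    res.2) 0

-- ===== PORT B =====
def solution_alt (cookie : List Int) : Int :=
  let n : Int := cookie.length
  let sp : Int × List Int :=
    cookie.foldl (fun p x =>
      let s := p.1 + x
      (s, p.2 ++ [s])) (0, [(0 : Int)])
  let pre := sp.2
  let res : PySem.Set Int × Int :=
    (PySem.List.pyRange 0 n 1).foldl
      (fun st m =>
        let seen := PySem.Set.add st.1 (PySem.List.pyGetD pre m 0)
        let t := 2 * PySem.List.pyGetD pre (m + 1) 0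
        let answer :=
          (PySem.List.pyRange (m + 1) n 1).foldl
            (fun answer j =>
              if PySem.Set.contains seen (t - PySem.List.pyGetD pre (j + 1) 0)
              then max answer (PySem.List.pyGetD pre (j + 1) 0 - PySem.List.pyGetD pre (m + 1) 0)
              else answer)
            st.2
        (seen, answer))
      (PySem.Set.empty, 0)
  res.2

-- ===== PRECONDITION & SPEC =====
def Spec_solution (cookie : List Int) (out : Int) : Prop := out = solution_alt cookie
instance (cookie : List Int) (out : Int) : Decidable (Spec_solution cookie out) := by unfold Spec_solution; infer_instance

-- ===== CLAIM (what is proved, stated in full; the proofs are below) =====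
def Claim_equal_solution : Prop := ∀ (cookie : List Int), Dom_solution cookie → Spec_solution cookie (solution cookie)

-- ===== LEMMAS AND PROOFS =====

-- prefix sum of the first k elements
def Pfx (cookie : List Int) (k : Nat) : Int := ((cookie.take k).sum)

-- the prefix-sum list B builds
def premap (cookie : List Int) : List Int := (List.range (cookie.length + 1)).map (Pfx cookie)

-- the outer-loop bodies of the two ports, as named functions (for the induction)
def bodyA (cookie : List Int) (answer : Int) (m : Int) : Int :=
  let ac : Int × PySem.Set Int :=
    (PySem.List.pyRange m (-1) (-1)).foldl
      (fun p i =>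
        let a := p.1 + PySem.List.pyGetD cookie i 0
        (a, PySem.Set.add p.2 a))
      (0, PySem.Set.empty)
  let res : Int × Int :=
    (PySem.List.pyRange (m + 1) (cookie.length : Int) 1).foldl
      (fun q j =>
        let b := q.1 + PySem.List.pyGetD cookie j 0
        (b, if PySem.Set.contains ac.2 b then max q.2 b else q.2))
      (0, answer)
  res.2

def bodyB (cookie pre : List Int) (st : PySem.Set Int × Int) (m : Int) : PySem.Set Int × Int :=
  let seen := PySem.Set.add st.1 (PySem.List.pyGetD pre m 0)
  let t := 2 * PySem.List.pyGetD pre (m + 1) 0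
  let answer :=
    (PySem.List.pyRange (m + 1) (cookie.length : Int) 1).foldl
      (fun answer j =>
        if PySem.Set.contains seen (t - PySem.List.pyGetD pre (j + 1) 0)
        then max answer (PySem.List.pyGetD pre (j + 1) 0 - PySem.List.pyGetD pre (m + 1) 0)
        else answer)
      st.2
  (seen, answer)

theorem Pfx_succ (cookie : List Int) (k : Nat) (hk : k < cookie.length) :
    Pfx cookie (k + 1) = Pfx cookie k + cookie[k] :=
  List.sum_take_succ cookie k hk

theorem pre_fold (cookie : List Int) : ∀ (s0 : Int) (l : List Int),
    cookie.foldl (fun p x => (p.1 + x, p.2 ++ [p.1 + x])) (s0, l)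
      = (s0 + cookie.sum, l ++ (List.range cookie.length).map (fun k => s0 + ((cookie.take (k+1)).sum))) := by
  induction cookie with
  | nil => intro s0 l; simp
  | cons x xs ih =>
    intro s0 l
    simp only [List.foldl_cons, ih]
    refine Prod.ext ?_ ?_
    · simp [add_assoc]
    · simp only [List.length_cons, List.range_succ_eq_map, List.map_cons, List.map_map,
        List.take_succ_cons, List.sum_cons, List.append_assoc, List.singleton_append]
      congr 1
      all_goals simp [add_assoc]

theorem pre_eq (cookie : List Int) :
    (cookie.foldl (fun p x => (p.1 + x, p.2 ++ [p.1 + x])) ((0:Int), [(0:Int)])).2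
      = premap cookie := by
  rw [pre_fold]
  simp only [premap, List.range_succ_eq_map, List.map_cons, List.map_map]
  simp [Pfx, Function.comp]

theorem pre_get (cookie : List Int) (k : Nat) (hk : k ≤ cookie.length) :
    PySem.List.pyGetD (premap cookie) (k : Int) 0 = Pfx cookie k := by
  simp only [premap, PySem.List.pyGetD_natCast]
  rw [List.getD_eq_getElem?_getD]
  simp [List.getElem?_map, List.getElem?_range (by omega : k < cookie.length + 1)]

theorem pyRange_down (m : Nat) :
    PySem.List.pyRange (m : Int) (-1) (-1)
      = (List.range (m + 1)).map (fun k : Nat => (m : Int) - (k : Int)) := by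
  have h1 : ¬ ((0:Int) < -1) := by decide
  have h2 : (-1 : Int) < (m : Int) := by omega
  simp only [PySem.List.pyRange, if_neg (by decide : ¬ (-1 : Int) = 0), h1, if_false, h2, if_true]
  have h3 : (((m : Int) - -1 + -(-1) - 1) / -(-1)).toNat = m + 1 := by
    norm_num
  rw [h3]
  apply List.map_congr_left
  intro k _
  ring

theorem pyGetD_at (cookie : List Int) (i : Nat) (hi : i < cookie.length) :
    PySem.List.pyGetD cookie (i : Int) 0 = cookie[i] := by
  simp [PySem.List.pyGetD_natCast, List.getD_eq_getElem?_getD, List.getElem?_eq_getElem hi]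

theorem leftAux (cookie : List Int) (m : Nat) (hm : m < cookie.length) :
    ∀ (t : Nat), t ≤ m + 1 →
    ∃ C : PySem.Set Int,
      (List.range t).foldl (fun (p : Int × PySem.Set Int) (k : Nat) =>
          let a := p.1 + PySem.List.pyGetD cookie ((m : Int) - (k : Int)) 0
          (a, PySem.Set.add p.2 a)) (0, PySem.Set.empty)
        = (Pfx cookie (m+1) - Pfx cookie (m+1-t), C)
      ∧ ∀ x, x ∈ C ↔ ∃ i, m+1-t ≤ i ∧ i ≤ m ∧ x = Pfx cookie (m+1) - Pfx cookie i := by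
  intro t
  induction t with
  | zero =>
    intro _
    refine ⟨PySem.Set.empty, by simp, ?_⟩
    intro x
    constructor
    · intro hx; exact absurd hx (by simp [PySem.Set.empty])
    · rintro ⟨i, h1, h2, _⟩; omega
  | succ t ih =>
    intro ht
    obtain ⟨C, hC, hmem⟩ := ih (by omega)
    have htm : t ≤ m := by omega
    have hcast : (m:Int) - (t:Int) = ((m - t : Nat) : Int) := by omega
    have hlt : m - t < cookie.length := by omega
    have hval : PySem.List.pyGetD cookie ((m:Int) - (t:Int)) 0 = cookie[m - t] := by
      rw [hcast, pyGetD_at cookie (m - t) hlt]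
    have hstep : Pfx cookie (m + 1 - t) = Pfx cookie (m - t) + cookie[m - t] := by
      have h4 : m + 1 - t = (m - t) + 1 := by omega
      rw [h4, Pfx_succ cookie (m - t) hlt]
    have ha : Pfx cookie (m+1) - Pfx cookie (m+1-t) + PySem.List.pyGetD cookie ((m:Int) - (t:Int)) 0
        = Pfx cookie (m+1) - Pfx cookie (m+1-(t+1)) := by
      rw [hval]
      have h5 : m + 1 - (t + 1) = m - t := by omega
      rw [h5]
      omega
    refine ⟨PySem.Set.add C (Pfx cookie (m+1) - Pfx cookie (m+1-(t+1))), ?_, ?_⟩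
    · rw [List.range_succ, List.foldl_append, hC]
      simp only [List.foldl_cons, List.foldl_nil, ha]
    · intro x
      rw [PySem.Set.mem_add, hmem]
      constructor
      · rintro (⟨i, h1, h2, h3⟩ | h)
        · exact ⟨i, by omega, h2, h3⟩
        · exact ⟨m + 1 - (t + 1), by omega, by omega, h⟩
      · rintro ⟨i, h1, h2, h3⟩
        by_cases hi : m + 1 - t ≤ i
        · exact Or.inl ⟨i, hi, h2, h3⟩
        · have h7 : i = m + 1 - (t + 1) := by omega
          exact Or.inr (by rw [h3, h7])

theorem left_set_mem (cookie : List Int) (m : Nat) (hm : m < cookie.length) :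
    ∃ C : PySem.Set Int,
      ((PySem.List.pyRange (m : Int) (-1) (-1)).foldl
          (fun (p : Int × PySem.Set Int) i =>
            let a := p.1 + PySem.List.pyGetD cookie i 0
            (a, PySem.Set.add p.2 a))
          (0, PySem.Set.empty)) = (Pfx cookie (m+1) - Pfx cookie 0, C)
      ∧ ∀ x, x ∈ C ↔ ∃ i, i ≤ m ∧ x = Pfx cookie (m+1) - Pfx cookie i := by
  rw [pyRange_down m, List.foldl_map]
  obtain ⟨C, hC, hmem⟩ := leftAux cookie m hm (m + 1) (le_refl _)
  refine ⟨C, ?_, ?_⟩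
  · rw [hC]
    have h0 : m + 1 - (m + 1) = 0 := by omega
    rw [h0]
  · intro x
    rw [hmem]
    constructor
    · rintro ⟨i, _, h2, h3⟩; exact ⟨i, h2, h3⟩
    · rintro ⟨i, h2, h3⟩; exact ⟨i, by omega, h2, h3⟩

theorem contains_iff (s : PySem.Set Int) (x : Int) :
    PySem.Set.contains s x = true ↔ x ∈ s := by
  simp [PySem.Set.contains]

theorem inner_eq (cookie : List Int) (c seen : PySem.Set Int) (m : Nat)
    (hm : m < cookie.length)
    (hc : ∀ x, x ∈ c ↔ ∃ i, i ≤ m ∧ x = Pfx cookie (m+1) - Pfx cookie i)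
    (hs : ∀ x, x ∈ seen ↔ ∃ i, i ≤ m ∧ x = Pfx cookie i) :
    ∀ (d : Nat) (j : Nat) (ans : Int), j + d = cookie.length → m + 1 ≤ j →
    ((PySem.List.pyRange (j : Int) (cookie.length : Int) 1).foldl
        (fun (q : Int × Int) jj =>
          let b := q.1 + PySem.List.pyGetD cookie jj 0
          (b, if PySem.Set.contains c b then max q.2 b else q.2))
        (Pfx cookie j - Pfx cookie (m+1), ans)).2
    = (PySem.List.pyRange (j : Int) (cookie.length : Int) 1).foldl
        (fun ans jj =>
          if PySem.Set.contains seen (2 * Pfx cookie (m+1) - PySem.List.pyGetD (premap cookie) (jj + 1) 0)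
          then max ans (PySem.List.pyGetD (premap cookie) (jj + 1) 0 - Pfx cookie (m+1))
          else ans) ans := by
  intro d
  induction d with
  | zero =>
    intro j ans hj _
    have hjl : (j : Int) = (cookie.length : Int) := by omega
    rw [hjl]
    have hempty : PySem.List.pyRange (cookie.length : Int) (cookie.length : Int) 1 = [] := by
      rw [PySem.List.pyRange_one]; simp
    rw [hempty]
    simp
  | succ d ih =>
    intro j ans hj hmj
    have hjn : j < cookie.length := by omega
    have hcons : PySem.List.pyRange (j : Int) (cookie.length : Int) 1
        = (j : Int) :: PySem.List.pyRange ((j : Int) + 1) (cookie.length : Int) 1 :=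
      PySem.List.pyRange_one_cons (by omega)
    have hcast : ((j : Int) + 1) = ((j + 1 : Nat) : Int) := by omega
    have hb : Pfx cookie j - Pfx cookie (m+1) + PySem.List.pyGetD cookie (j : Int) 0
        = Pfx cookie (j+1) - Pfx cookie (m+1) := by
      rw [pyGetD_at cookie j hjn]
      have h8 := Pfx_succ cookie j hjn
      omega
    have hpre : PySem.List.pyGetD (premap cookie) ((j : Int) + 1) 0 = Pfx cookie (j+1) := by
      rw [hcast, pre_get cookie (j+1) (by omega)]
    have hguard : (PySem.Set.contains c (Pfx cookie (j+1) - Pfx cookie (m+1)))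
        = (PySem.Set.contains seen (2 * Pfx cookie (m+1) - Pfx cookie (j+1))) := by
      by_cases h : (Pfx cookie (j+1) - Pfx cookie (m+1)) ∈ c
      · have h' : (2 * Pfx cookie (m+1) - Pfx cookie (j+1)) ∈ seen := by
          rw [hc] at h
          obtain ⟨i, hi, hx⟩ := h
          rw [hs]
          exact ⟨i, hi, by omega⟩
        rw [(contains_iff _ _).2 h, (contains_iff _ _).2 h']
      · have h' : ¬ (2 * Pfx cookie (m+1) - Pfx cookie (j+1)) ∈ seen := by
          intro hh
          apply h
          rw [hs] at hh
          obtain ⟨i, hi, hx⟩ := hh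
          rw [hc]
          exact ⟨i, hi, by omega⟩
        have e1 : PySem.Set.contains c (Pfx cookie (j+1) - Pfx cookie (m+1)) = false := by
          rw [← Bool.not_eq_true, contains_iff]; exact h
        have e2 : PySem.Set.contains seen (2 * Pfx cookie (m+1) - Pfx cookie (j+1)) = false := by
          rw [← Bool.not_eq_true, contains_iff]; exact h'
        rw [e1, e2]
    rw [hcons]
    simp only [List.foldl_cons, hb, hpre, hguard]
    rw [hcast]
    exact ih (j + 1)
      (if PySem.Set.contains seen (2 * Pfx cookie (m+1) - Pfx cookie (j+1)) = true
       then max ans (Pfx cookie (j+1) - Pfx cookie (m+1)) else ans)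
      (by omega) (by omega)

theorem outer_eq (cookie : List Int) : ∀ (t : Nat), t ≤ cookie.length →
    ∃ s : PySem.Set Int,
      (List.range t).foldl (fun st (k : Nat) => bodyB cookie (premap cookie) st (k : Int)) (PySem.Set.empty, 0)
        = (s, (List.range t).foldl (fun a (k : Nat) => bodyA cookie a (k : Int)) 0)
      ∧ ∀ x, x ∈ s ↔ ∃ i, i < t ∧ x = Pfx cookie i := by
  intro t
  induction t with
  | zero =>
    intro _
    refine ⟨PySem.Set.empty, by simp, ?_⟩
    intro x
    constructor
    · intro hx; exact absurd hx (by simp [PySem.Set.empty])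
    · rintro ⟨i, h1, _⟩; omega
  | succ t ih =>
    intro ht
    obtain ⟨s, hfold, hmem⟩ := ih (by omega)
    have htn : t < cookie.length := by omega
    have hseen : PySem.List.pyGetD (premap cookie) ((t : Nat) : Int) 0 = Pfx cookie t :=
      pre_get cookie t (by omega)
    have hcast : ((t : Int) + 1) = ((t + 1 : Nat) : Int) := by omega
    have hpre1 : PySem.List.pyGetD (premap cookie) ((t : Int) + 1) 0 = Pfx cookie (t+1) := by
      rw [hcast, pre_get cookie (t+1) (by omega)]
    obtain ⟨C, hC, hCmem⟩ := left_set_mem cookie t htn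
    have hseenmem : ∀ x, x ∈ PySem.Set.add s (Pfx cookie t) ↔ ∃ i, i ≤ t ∧ x = Pfx cookie i := by
      intro x
      rw [PySem.Set.mem_add, hmem]
      constructor
      · rintro (⟨i, h1, h2⟩ | h)
        · exact ⟨i, by omega, h2⟩
        · exact ⟨t, le_refl _, h⟩
      · rintro ⟨i, h1, h2⟩
        by_cases hi : i < t
        · exact Or.inl ⟨i, hi, h2⟩
        · have h9 : i = t := by omega
          exact Or.inr (by rw [h2, h9])
    have hmem' : ∀ x, x ∈ PySem.Set.add s (Pfx cookie t) ↔ ∃ i, i < t + 1 ∧ x = Pfx cookie i := by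
      intro x
      rw [hseenmem x]
      constructor
      · rintro ⟨i, h1, h2⟩; exact ⟨i, by omega, h2⟩
      · rintro ⟨i, h1, h2⟩; exact ⟨i, by omega, h2⟩
    have hinner := inner_eq cookie C (PySem.Set.add s (Pfx cookie t)) t htn hCmem hseenmem
      (cookie.length - (t + 1)) (t + 1) ((List.range t).foldl (fun a (k : Nat) => bodyA cookie a (k : Int)) 0)
      (by omega) (by omega)
    rw [sub_self] at hinner
    refine ⟨PySem.Set.add s (Pfx cookie t), ?_, hmem'⟩
    rw [List.range_succ, List.foldl_append, List.foldl_append, hfold]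
    simp only [List.foldl_cons, List.foldl_nil]
    unfold bodyA bodyB
    simp only [hseen, hpre1, hC]
    rw [hcast]
    refine Prod.ext rfl ?_
    exact hinner.symm

theorem solution_eq (cookie : List Int) :
    solution cookie
      = (List.range cookie.length).foldl (fun a (k : Nat) => bodyA cookie a (k : Int)) 0 := by
  show ((PySem.List.pyRange 0 (cookie.length : Int) 1).foldl (fun a m => bodyA cookie a m) 0) = _
  rw [PySem.List.pyRange_one, List.foldl_map]
  simp

theorem solution_alt_eq (cookie : List Int) :
    solution_alt cookie
      = ((List.range cookie.length).foldl
          (fun st (k : Nat) => bodyB cookie (premap cookie) st (k : Int)) (PySem.Set.empty, 0)).2 := by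
  show ((PySem.List.pyRange 0 (cookie.length : Int) 1).foldl
      (fun st m => bodyB cookie
        (cookie.foldl (fun p x => (p.1 + x, p.2 ++ [p.1 + x])) ((0:Int), [(0:Int)])).2 st m)
      (PySem.Set.empty, 0)).2 = _
  rw [pre_eq, PySem.List.pyRange_one, List.foldl_map]
  simp

-- ===== VERDICT (by name: the statement is the Claim_ definition above) =====
theorem solution_spec : Claim_equal_solution := by
  intro cookie _
  unfold Spec_solution
  rw [solution_eq, solution_alt_eq]
  obtain ⟨s, hfold, _⟩ := outer_eq cookie cookie.length (le_refl _)
  rw [hfold]
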